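-- pv_equiv track=rewrite | github.com/ishandutta2007/codeforces | sevlll777/normal/1005/D.py | solve
-- ===== SOURCE A (Python) =====
-- def solve(s2):
--     dp = [0] * (len(s2) + 1)
--     for i in range(len(s2)):
--         dp[i + 1] = dp[i]
--         if i > 0 and int(s2[i] + s2[i - 1]) % 3 == 0:
--             dp[i + 1] = max(dp[i + 1], 1 + dp[i - 1])
--         if i > 1 and int(s2[i] + s2[i - 1] + s2[i - 2]) % 3 == 0:
--             dp[i + 1] = max(dp[i + 1], 1 + dp[i - 2])
--     return dp[-1]
-- ===== SOURCE B (Python) =====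
-- def solve(s2):
--     # Greedy interval scheduling: candidate pieces are length-2/3 windows whose
--     # digit sum is divisible by 3 (detected by equal prefix sums mod 3); taking
--     # the earliest-ending compatible piece is optimal.
--     if len(s2) < 2:
--         return 0
--     pref = [0]
--     s = 0
--     for ch in s2:
--         s = (s + int(ch)) % 3
--         pref.append(s)
--     n = len(pref) - 1
--     count = 0
--     last = 0
--     for j in range(2, n + 1):
--         if j - 2 >= last and pref[j] == pref[j - 2]:
--             count += 1
--             last = j
--         elif j - 3 >= last and pref[j] == pref[j - 3]:
--             count += 1
--             last = j
--     return count
-- ===== Notes on version B (the rewrite author's own statement) =====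
-- stated objective: alternative
-- what changed: B replaces A's dynamic program (dp array with max over pair/triple windows parsed by int() concatenation) with a greedy interval-scheduling algorithm: it builds prefix digit sums mod 3 once, treats equal-prefix windows of length 2/3 as candidate intervals, and greedily takes the earliest-ending interval compatible with the last one taken; earliest-finish greedy is optimal for unit-weight interval scheduling, so it equals the DP optimum.
-- outside the precondition, e.g. on solve(' 12'): A returns 1, B raises ValueError
import Mathlib
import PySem

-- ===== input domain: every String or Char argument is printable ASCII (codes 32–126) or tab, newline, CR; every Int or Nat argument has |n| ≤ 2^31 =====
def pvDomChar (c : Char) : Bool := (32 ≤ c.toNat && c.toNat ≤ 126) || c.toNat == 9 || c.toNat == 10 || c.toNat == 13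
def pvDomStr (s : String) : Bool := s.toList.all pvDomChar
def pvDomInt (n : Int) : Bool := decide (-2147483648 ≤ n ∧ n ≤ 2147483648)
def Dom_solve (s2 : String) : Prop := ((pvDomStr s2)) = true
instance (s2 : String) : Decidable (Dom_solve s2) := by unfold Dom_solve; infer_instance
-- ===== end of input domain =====

-- B: greedy interval scheduling over prefix digit sums mod 3 (take the earliest-ending
-- divisible window of length 2/3 compatible with the last taken) instead of A's dp array;
-- same O(n) cost, a different algorithm whose optimality is proved against A's DP.


-- ===== PORT A =====
-- one loop step of A's `for i in range(len(s2))` body (cs.getD i ' ' is exact for s2[i]: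
-- 0 ≤ i < len(s2) always holds where it is read, and i-1 / i-2 are read only under the guards)
def solveStepA (cs : List Char) (dp : List Int) (i : Nat) : List Int :=
  -- dp[i + 1] = dp[i]
  let dp1 := PySem.List.pySetD dp ((i : Int) + 1) (PySem.List.pyGetD dp (i : Int) 0)
  -- if i > 0 and int(s2[i] + s2[i - 1]) % 3 == 0:  dp[i + 1] = max(dp[i + 1], 1 + dp[i - 1])
  -- (.getD 0 stands for the value of int(...); Pre_solve rules out the ValueError case)
  let dp2 :=
    if decide (0 < i) &&
        (PySem.Int.mod ((PySem.Int.ofChars? [cs.getD i ' ', cs.getD (i - 1) ' ']).getD 0) 3 == 0)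
    then PySem.List.pySetD dp1 ((i : Int) + 1)
          (max (PySem.List.pyGetD dp1 ((i : Int) + 1) 0) (1 + PySem.List.pyGetD dp1 ((i : Int) - 1) 0))
    else dp1
  -- if i > 1 and int(s2[i] + s2[i - 1] + s2[i - 2]) % 3 == 0:  dp[i + 1] = max(dp[i + 1], 1 + dp[i - 2])
  if decide (1 < i) &&
      (PySem.Int.mod ((PySem.Int.ofChars? [cs.getD i ' ', cs.getD (i - 1) ' ', cs.getD (i - 2) ' ']).getD 0) 3 == 0)
  then PySem.List.pySetD dp2 ((i : Int) + 1)
        (max (PySem.List.pyGetD dp2 ((i : Int) + 1) 0) (1 + PySem.List.pyGetD dp2 ((i : Int) - 2) 0))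
  else dp2

def solve (s2 : String) : Int :=
  let cs := s2.toList
  -- dp = [0] * (len(s2) + 1)
  let dp := (List.range cs.length).foldl (solveStepA cs) (List.replicate (cs.length + 1) 0)
  -- return dp[-1]
  PySem.List.pyGetD dp (-1) 0

-- ===== PORT B =====
-- B's first loop: s = (s + int(ch)) % 3; pref.append(s)  — state (s, pref)
def prefStepB (st : Int × List Int) (ch : Char) : Int × List Int :=
  let s := PySem.Int.mod (st.1 + (PySem.Int.ofChars? [ch]).getD 0) 3
  (s, st.2 ++ [s])

-- B's greedy loop body for j in range(2, n + 1) — state (count, last)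
def greedyStepB (pref : List Int) (st : Int × Int) (j : Nat) : Int × Int :=
  if decide (st.2 ≤ (j : Int) - 2) &&
      (PySem.List.pyGetD pref (j : Int) 0 == PySem.List.pyGetD pref ((j : Int) - 2) 0) then
    (st.1 + 1, (j : Int))
  else if decide (st.2 ≤ (j : Int) - 3) &&
      (PySem.List.pyGetD pref (j : Int) 0 == PySem.List.pyGetD pref ((j : Int) - 3) 0) then
    (st.1 + 1, (j : Int))
  else st

def solve_alt (s2 : String) : Int :=
  if s2.toList.length < 2 then 0
  else
    let pref := (s2.toList.foldl prefStepB (0, [0])).2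
    let n := pref.length - 1
    -- for j in range(2, n + 1)
    ((List.range' 2 (n - 1)).foldl (greedyStepB pref) (0, 0)).1

-- ===== PRECONDITION & SPEC =====
-- Pre_solve excludes strings of length ≥ 2 containing a non-digit character: on almost all of
-- those A's int() raises ValueError, though on a few whitespace layouts (e.g. " 12") the
-- concatenated int() still succeeds after stripping while B's per-character int() raises.
def Pre_solve (s2 : String) : Prop :=
  s2.toList.length ≤ 1 ∨ s2.toList.all Char.isDigit = true
instance (s2 : String) : Decidable (Pre_solve s2) := by unfold Pre_solve; infer_instance
def pvWitness_solve : String := "36099"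
def Spec_solve (s2 : String) (out : Int) : Prop := out = solve_alt s2
instance (s2 : String) (out : Int) : Decidable (Spec_solve s2 out) := by unfold Spec_solve; infer_instance

-- ===== CLAIM (what is proved, stated in full; the proofs are below) =====
def Claim_equal_solve : Prop := ∀ (s2 : String), Dom_solve s2 → Pre_solve s2 → Spec_solve s2 (solve s2)

-- ===== LEMMAS AND PROOFS =====

-- digit value of a character
def dval (c : Char) : Int := ((c.toNat - 48 : Nat) : Int)

-- the optimum both programs compute: best d i = max disjoint divisible pieces in the first i digits
def best (d : List Int) : Nat → Int
  | 0 => 0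
  | (i + 1) =>
    let v := best d i
    let v := if 0 < i ∧ (d.getD i 0 + d.getD (i - 1) 0) % 3 = 0 then max v (1 + best d (i - 1)) else v
    if 1 < i ∧ (d.getD i 0 + d.getD (i - 1) 0 + d.getD (i - 2) 0) % 3 = 0 then max v (1 + best d (i - 2)) else v

-- prefix digit sum mod 3 (the value of B's running variable s after j characters)
def S (d : List Int) : Nat → Int
  | 0 => 0
  | (j + 1) => PySem.Int.mod (S d j + d.getD j 0) 3

lemma digit_exists (c : Char) (h : c.isDigit = true) : ∃ k : Fin 10, c = Char.ofNat (48 + k.val) := by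
  have h48 : 48 ≤ c.toNat ∧ c.toNat ≤ 57 := by
    simp [Char.isDigit] at h
    exact ⟨h.1, h.2⟩
  refine ⟨⟨c.toNat - 48, by omega⟩, ?_⟩
  have : 48 + (c.toNat - 48) = c.toNat := by omega
  rw [this]
  exact (Char.ofNat_toNat c).symm

lemma ofChars_single (c : Char) (h : c.isDigit = true) :
    PySem.Int.ofChars? [c] = some (dval c) := by
  obtain ⟨k, rfl⟩ := digit_exists c h
  have : ∀ k : Fin 10, PySem.Int.ofChars? [Char.ofNat (48 + k.val)] = some (dval (Char.ofNat (48 + k.val))) := by decide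
  exact this k

lemma ofChars_pair (c1 c0 : Char) (h1 : c1.isDigit = true) (h0 : c0.isDigit = true) :
    PySem.Int.ofChars? [c1, c0] = some (10 * dval c1 + dval c0) := by
  obtain ⟨k1, rfl⟩ := digit_exists c1 h1
  obtain ⟨k0, rfl⟩ := digit_exists c0 h0
  have : ∀ k1 k0 : Fin 10, PySem.Int.ofChars? [Char.ofNat (48 + k1.val), Char.ofNat (48 + k0.val)] =
      some (10 * dval (Char.ofNat (48 + k1.val)) + dval (Char.ofNat (48 + k0.val))) := by decide
  exact this k1 k0

lemma ofChars_triple (c2 c1 c0 : Char) (h2 : c2.isDigit = true) (h1 : c1.isDigit = true) (h0 : c0.isDigit = true) :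
    PySem.Int.ofChars? [c2, c1, c0] = some (100 * dval c2 + 10 * dval c1 + dval c0) := by
  obtain ⟨k2, rfl⟩ := digit_exists c2 h2
  obtain ⟨k1, rfl⟩ := digit_exists c1 h1
  obtain ⟨k0, rfl⟩ := digit_exists c0 h0
  have : ∀ k2 k1 k0 : Fin 10, PySem.Int.ofChars? [Char.ofNat (48 + k2.val), Char.ofNat (48 + k1.val), Char.ofNat (48 + k0.val)] =
      some (100 * dval (Char.ofNat (48 + k2.val)) + 10 * dval (Char.ofNat (48 + k1.val)) + dval (Char.ofNat (48 + k0.val))) := by decide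
  exact this k2 k1 k0

lemma mod3_beq (x : Int) : (PySem.Int.mod x 3 == 0) = decide (x % 3 = 0) := by
  by_cases h : (3:Int) ∣ x
  · simp [h, Int.emod_eq_zero_of_dvd h]
  · simp [PySem.Int.mod_eq_zero_iff_dvd, h]

-- ---------- A-side: the dp list A maintains after i loop steps ----------
def dpList (d : List Int) (n i : Nat) : List Int :=
  (List.range (n + 1)).map (fun j => if j ≤ i then best d j else 0)

lemma dpList_length (d : List Int) (n i : Nat) : (dpList d n i).length = n + 1 := by
  simp [dpList]

lemma dpList_getD_le {d : List Int} {n i j : Nat} (h1 : j ≤ i) (h2 : j < n + 1) :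
    (dpList d n i).getD j 0 = best d j := by
  rw [List.getD_eq_getElem _ _ (by simp [dpList]; omega)]
  simp [dpList, h1]

lemma dpList_set_eq (d : List Int) (n i : Nat) (hi : i < n) :
    (dpList d n i).set (i + 1) (best d (i + 1)) = dpList d n (i + 1) := by
  apply List.ext_getElem
  · simp [dpList]
  · intro j hj1 hj2
    simp only [List.getElem_set, dpList, List.getElem_map, List.getElem_range]
    rcases Nat.lt_trichotomy j (i + 1) with h | h | h
    · have : j ≤ i := by omega
      simp [this, Nat.le_of_lt h, Nat.ne_of_gt h]
    · simp [h]
    · have h1 : ¬ j ≤ i := by omega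
      have h2 : ¬ j ≤ i + 1 := by omega
      simp [h1, h2, Nat.ne_of_lt h]

lemma dpList_getElem {d : List Int} {n i j : Nat} (h1 : j ≤ i) (hj : j < (dpList d n i).length) :
    (dpList d n i)[j] = best d j := by
  have hj' : j < n + 1 := by simpa [dpList] using hj
  simp [dpList, h1]

lemma getD_set_ne (l : List Int) (i j : Nat) (v : Int) (h : i ≠ j) :
    (l.set i v).getD j 0 = l.getD j 0 := by
  simp [List.getD_eq_getElem?_getD, List.getElem?_set, h]

lemma getD_set_self (l : List Int) (i : Nat) (v : Int) (h : i < l.length) :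
    (l.set i v).getD i 0 = v := by
  simp [List.getD_eq_getElem?_getD, List.getElem?_set, h]

lemma A_step (cs : List Char) (hd : cs.all Char.isDigit = true) (i : Nat) (hi : i < cs.length) :
    solveStepA cs (dpList (cs.map dval) cs.length i) i = dpList (cs.map dval) cs.length (i + 1) := by
  have hall : ∀ j, (hj : j < cs.length) → cs[j].isDigit = true := by
    intro j hj; exact (List.all_eq_true.mp hd) _ (List.getElem_mem hj)
  have hc1 : ((i : Int) + 1) = (((i + 1 : Nat)) : Int) := by push_cast; ring
  set d := cs.map dval with hdd
  set n := cs.length with hnn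
  have r0 : (dpList d n i).getD i 0 = best d i := dpList_getD_le (Nat.le_refl i) (by omega)
  have gSelf : ∀ v : Int, ((dpList d n i).set (i + 1) v).getD (i + 1) 0 = v := by
    intro v; exact getD_set_self _ _ _ (by rw [dpList_length]; omega)
  have gm1 : ∀ v : Int, ((dpList d n i).set (i + 1) v).getD (i - 1) 0 = best d (i - 1) := by
    intro v; rw [getD_set_ne _ _ _ _ (by omega)]; exact dpList_getD_le (by omega) (by omega)
  have gm2 : ∀ v : Int, ((dpList d n i).set (i + 1) v).getD (i - 2) 0 = best d (i - 2) := by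
    intro v; rw [getD_set_ne _ _ _ _ (by omega)]; exact dpList_getD_le (by omega) (by omega)
  simp only [solveStepA, hc1, PySem.List.pySetD_natCast, PySem.List.pyGetD_natCast, r0, mod3_beq]
  by_cases h0 : 0 < i
  · have hi1 : i - 1 < n := by omega
    have e1m : ((i : Int) - 1) = (((i - 1 : Nat)) : Int) := by omega
    have hpair : (PySem.Int.ofChars? [cs.getD i ' ', cs.getD (i - 1) ' ']).getD 0 =
        10 * d.getD i 0 + d.getD (i - 1) 0 := by
      rw [List.getD_eq_getElem _ _ hi, List.getD_eq_getElem _ _ hi1,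
        ofChars_pair _ _ (hall _ hi) (hall _ hi1)]
      rw [hdd, List.getD_eq_getElem _ _ (by simpa using hi), List.getD_eq_getElem _ _ (by simpa using hi1)]
      simp
    have cp : ((10 * d.getD i 0 + d.getD (i - 1) 0) % 3 = 0) = ((d.getD i 0 + d.getD (i - 1) 0) % 3 = 0) :=
      propext (by omega)
    simp only [hpair, cp]
    by_cases h1 : 1 < i
    · have hi2 : i - 2 < n := by omega
      have e2m : ((i : Int) - 2) = (((i - 2 : Nat)) : Int) := by omega
      have htrip : (PySem.Int.ofChars? [cs.getD i ' ', cs.getD (i - 1) ' ', cs.getD (i - 2) ' ']).getD 0 =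
          100 * d.getD i 0 + 10 * d.getD (i - 1) 0 + d.getD (i - 2) 0 := by
        rw [List.getD_eq_getElem _ _ hi, List.getD_eq_getElem _ _ hi1, List.getD_eq_getElem _ _ hi2,
          ofChars_triple _ _ _ (hall _ hi) (hall _ hi1) (hall _ hi2)]
        rw [hdd, List.getD_eq_getElem _ _ (by simpa using hi), List.getD_eq_getElem _ _ (by simpa using hi1),
          List.getD_eq_getElem _ _ (by simpa using hi2)]
        simp
      have ct : ((100 * d.getD i 0 + 10 * d.getD (i - 1) 0 + d.getD (i - 2) 0) % 3 = 0) =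
          ((d.getD i 0 + d.getD (i - 1) 0 + d.getD (i - 2) 0) % 3 = 0) := propext (by omega)
      simp only [htrip, ct]
      by_cases hP1 : (d.getD i 0 + d.getD (i - 1) 0) % 3 = 0 <;>
        by_cases hP2 : (d.getD i 0 + d.getD (i - 1) 0 + d.getD (i - 2) 0) % 3 = 0 <;>
        simp only [h0, h1, hP1, hP2, decide_true, decide_false, Bool.true_and, Bool.false_and,
          Bool.and_true, Bool.and_false, if_true, if_false, Bool.true_eq_false, Bool.false_eq_true,
          ite_true, ite_false, List.set_set, e1m, e2m, PySem.List.pyGetD_natCast, gSelf, gm1, gm2] <;>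
        rw [← dpList_set_eq d n i hi] <;> congr 1 <;> simp only [best]
      · rw [if_pos ⟨h1, hP2⟩, if_pos ⟨h0, hP1⟩]
      · rw [if_neg (fun h => hP2 h.2), if_pos ⟨h0, hP1⟩]
      · rw [if_pos ⟨h1, hP2⟩, if_neg (fun h => hP1 h.2)]
      · rw [if_neg (fun h => hP2 h.2), if_neg (fun h => hP1 h.2)]
    · by_cases hP1 : (d.getD i 0 + d.getD (i - 1) 0) % 3 = 0 <;>
        simp only [h0, h1, hP1, decide_true, decide_false, Bool.true_and, Bool.false_and,
          Bool.and_true, Bool.and_false, if_true, if_false, Bool.true_eq_false, Bool.false_eq_true,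
          ite_true, ite_false, List.set_set, e1m, PySem.List.pyGetD_natCast, gSelf, gm1] <;>
        rw [← dpList_set_eq d n i hi] <;> congr 1 <;> simp only [best]
      · rw [if_neg (fun h => h1 h.1), if_pos ⟨h0, hP1⟩]
      · rw [if_neg (fun h => h1 h.1), if_neg (fun h => hP1 h.2)]
  · have h1 : ¬ 1 < i := by omega
    simp only [h0, h1, decide_false, Bool.false_and, Bool.false_eq_true, if_false]
    have hb : best d i = best d (i + 1) := by
      have : i = 0 := by omega
      subst this
      simp [best]
    rw [hb]
    exact dpList_set_eq d n i hi

lemma A_inv (cs : List Char) (hd : cs.all Char.isDigit = true) (i : Nat) (hi : i ≤ cs.length) :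
    (List.range i).foldl (solveStepA cs) (List.replicate (cs.length + 1) 0) =
      dpList (cs.map dval) cs.length i := by
  induction i with
  | zero =>
    apply List.ext_getElem
    · simp [dpList]
    · intro j h1 h2
      simp only [dpList, List.getElem_map, List.getElem_range, List.getElem_replicate]
      simp only [List.length_replicate] at h1
      rcases Nat.eq_zero_or_pos j with h | h
      · subst h; simp [best]
      · simp [Nat.pos_iff_ne_zero.mp h]
  | succ i ih =>
    rw [List.range_succ, List.foldl_append, ih (by omega)]
    simp only [List.foldl_cons, List.foldl_nil]
    exact A_step cs hd i (by omega)

-- ---------- B-side ----------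

lemma S_bounds (d : List Int) (j : Nat) : 0 ≤ S d j ∧ S d j < 3 := by
  cases j with
  | zero => simp [S]
  | succ j =>
    simp only [S]
    exact ⟨PySem.Int.mod_nonneg _ (by omega), PySem.Int.mod_lt _ (by omega)⟩

lemma S_succ_emod (d : List Int) (j : Nat) : S d (j + 1) = (S d j + d.getD j 0) % 3 := by
  simp only [S]
  exact PySem.Int.mod_eq_emod_of_pos (by omega)

-- equal prefix sums two apart ⇔ the pair ending there is divisible by 3
lemma S_pair (d : List Int) (j : Nat) :
    (S d (j + 2) = S d j) ↔ (d.getD (j + 1) 0 + d.getD j 0) % 3 = 0 := by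
  have h0 := S_bounds d j
  rw [S_succ_emod, S_succ_emod]
  omega

-- equal prefix sums three apart ⇔ the triple ending there is divisible by 3
lemma S_triple (d : List Int) (j : Nat) :
    (S d (j + 3) = S d j) ↔ (d.getD (j + 2) 0 + d.getD (j + 1) 0 + d.getD j 0) % 3 = 0 := by
  have h0 := S_bounds d j
  rw [S_succ_emod, S_succ_emod, S_succ_emod]
  omega

lemma best_mono {d : List Int} {a b : Nat} (h : a ≤ b) : best d a ≤ best d b := by
  induction b with
  | zero => simp_all
  | succ b ih =>
    rcases Nat.lt_or_ge a (b + 1) with h' | h'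
    · have := ih (by omega)
      have hstep : best d b ≤ best d (b + 1) := by
        simp only [best]
        split_ifs <;> omega
      omega
    · have : a = b + 1 := by omega
      subst this; rfl

-- B's prefix-list fold builds exactly the table of S values
lemma pref_fold_aux (d : List Int) (l : List Char) (i : Nat)
    (hl : l.map (fun ch => (PySem.Int.ofChars? [ch]).getD 0) = d.drop i)
    (hi : i + l.length = d.length) :
    l.foldl prefStepB (S d i, (List.range (i + 1)).map (S d))
      = (S d d.length, (List.range (d.length + 1)).map (S d)) := by
  induction l generalizing i with
  | nil =>
    simp only [List.length_nil, Nat.add_zero] at hi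
    subst hi
    simp
  | cons c l ih =>
    have hilen : i < d.length := by simp at hi; omega
    have hdrop : d.drop i = d[i] :: d.drop (i + 1) := List.drop_eq_getElem_cons hilen
    rw [hdrop, List.map_cons] at hl
    have hc : (PySem.Int.ofChars? [c]).getD 0 = d.getD i 0 := by
      have := (List.cons.injEq _ _ _ _).mp hl
      rw [this.1, List.getD_eq_getElem _ _ hilen]
    have htl : l.map (fun ch => (PySem.Int.ofChars? [ch]).getD 0) = d.drop (i + 1) := by
      have := (List.cons.injEq _ _ _ _).mp hl
      exact this.2
    simp only [List.foldl_cons, prefStepB, hc]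
    have hS : PySem.Int.mod (S d i + d.getD i 0) 3 = S d (i + 1) := rfl
    rw [hS]
    have hmap : (List.range (i + 1)).map (S d) ++ [S d (i + 1)] = (List.range (i + 2)).map (S d) := by
      rw [List.range_succ (n := i + 1), List.map_append]
      rfl
    rw [hmap]
    exact ih (i + 1) htl (by simp at hi ⊢; omega)

-- the invariant greedy maintains: after scanning ends ≤ j, count = best j, best is flat on
-- [last, j], and just before the last taken piece the optimum was count - 1
def INV (d : List Int) (j : Nat) (st : Int × Int) : Prop :=
  ∃ ln : Nat, st.2 = (ln : Int) ∧ ln ≤ j ∧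
    (∀ k, ln ≤ k → k ≤ j → best d k = st.1) ∧
    ((ln = 0 ∧ st.1 = 0) ∨ (2 ≤ ln ∧ best d (ln - 1) = st.1 - 1))

lemma pref_getD (d : List Int) (n j : Nat) (hj : j ≤ n) :
    PySem.List.pyGetD ((List.range (n + 1)).map (S d)) (j : Int) 0 = S d j := by
  rw [PySem.List.pyGetD_natCast, List.getD_eq_getElem _ _ (by simp; omega)]
  simp

lemma best_succ_eq (d : List Int) (i : Nat) :
    best d (i + 1) =
      (if 1 < i ∧ (d.getD i 0 + d.getD (i - 1) 0 + d.getD (i - 2) 0) % 3 = 0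
       then max (if 0 < i ∧ (d.getD i 0 + d.getD (i - 1) 0) % 3 = 0
                 then max (best d i) (1 + best d (i - 1)) else best d i) (1 + best d (i - 2))
       else (if 0 < i ∧ (d.getD i 0 + d.getD (i - 1) 0) % 3 = 0
             then max (best d i) (1 + best d (i - 1)) else best d i)) := by
  simp only [best]

lemma greedy_step (d : List Int) (n j : Nat) (hj : j + 2 ≤ n) (st : Int × Int)
    (hinv : INV d (j + 1) st) :
    INV d (j + 2) (greedyStepB ((List.range (n + 1)).map (S d)) st (j + 2)) := by
  obtain ⟨ln, hln, hle, hflat, hlast⟩ := hinv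
  set pref := (List.range (n + 1)).map (S d) with hpref
  have hg0 : PySem.List.pyGetD pref ((j + 2 : Nat) : Int) 0 = S d (j + 2) := pref_getD d n _ hj
  have e2 : (((j + 2 : Nat)) : Int) - 2 = ((j : Nat) : Int) := by push_cast; ring
  have hg2 : PySem.List.pyGetD pref ((((j + 2 : Nat)) : Int) - 2) 0 = S d j := by
    rw [e2]; exact pref_getD d n _ (by omega)
  have hbj1 : best d (j + 1) = st.1 := hflat _ hle (le_refl _)
  have e1 : j + 1 - 1 = j := by omega
  have e2' : j + 1 - 2 = j - 1 := by omega
  unfold greedyStepB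
  rw [hg0, hg2, hln]
  by_cases g1 : (ln : Int) ≤ ((j + 2 : Nat) : Int) - 2 ∧ S d (j + 2) = S d j
  · -- take the pair ending at j+2
    have hlnj : ln ≤ j := by have := g1.1; push_cast at this; omega
    have hP2 : (d.getD (j + 1) 0 + d.getD j 0) % 3 = 0 := (S_pair d j).mp g1.2
    rw [if_pos (by simp only [Bool.and_eq_true, decide_eq_true_eq, beq_iff_eq]; exact ⟨g1.1, g1.2⟩)]
    refine ⟨j + 2, rfl, le_refl _, ?_, Or.inr ⟨by omega, by simpa using hbj1⟩⟩
    intro k hk1 hk2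
    have hk : k = j + 2 := by omega
    subst hk
    have hbj : best d j = st.1 := hflat _ hlnj (by omega)
    have hmono : best d (j - 1) ≤ st.1 := by
      rw [← hbj1]; exact best_mono (by omega)
    show best d (j + 1 + 1) = st.1 + 1
    rw [best_succ_eq, e1, e2', hbj1, hbj]
    split_ifs with h1 h2 h2
    · omega
    · exact absurd ⟨Nat.succ_pos j, hP2⟩ h2
    · omega
    · exact absurd ⟨Nat.succ_pos j, hP2⟩ h2
  · rw [if_neg (by
      intro hcon
      simp only [Bool.and_eq_true, decide_eq_true_eq, beq_iff_eq] at hcon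
      exact g1 hcon)]
    by_cases g2 : (ln : Int) ≤ ((j + 2 : Nat) : Int) - 3 ∧
        PySem.List.pyGetD pref ((((j + 2 : Nat)) : Int) - 3) 0 = S d (j + 2)
    · -- take the triple ending at j+2
      have hj1 : 1 ≤ j := by
        by_contra h
        have : j = 0 := by omega
        subst this
        have := g2.1
        push_cast at this
        omega
      have e3 : (((j + 2 : Nat)) : Int) - 3 = ((j - 1 : Nat) : Int) := by push_cast; omega
      have hg3 : PySem.List.pyGetD pref ((((j + 2 : Nat)) : Int) - 3) 0 = S d (j - 1) := by
        rw [e3]; exact pref_getD d n _ (by omega)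
      have hSeq : S d (j + 2) = S d (j - 1) := by rw [← g2.2, hg3]
      have hlnj1 : ln ≤ j - 1 := by have := g2.1; push_cast at this; omega
      have hP3 : (d.getD (j + 1) 0 + d.getD j 0 + d.getD (j - 1) 0) % 3 = 0 := by
        have ht := (S_triple d (j - 1)).mp (by
          have e' : j - 1 + 3 = j + 2 := by omega
          rw [e']; exact hSeq)
        have ea : j - 1 + 2 = j + 1 := by omega
        have eb : j - 1 + 1 = j := by omega
        rwa [ea, eb] at ht
      -- the pair condition must FAIL here (else guard 1 would have fired)
      have hnP2 : ¬ (d.getD (j + 1) 0 + d.getD j 0) % 3 = 0 := by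
        intro hcon
        exact g1 ⟨by push_cast; omega, (S_pair d j).mpr hcon⟩
      rw [if_pos (by simp only [Bool.and_eq_true, decide_eq_true_eq, beq_iff_eq]; exact ⟨g2.1, g2.2.symm⟩)]
      refine ⟨j + 2, rfl, le_refl _, ?_, Or.inr ⟨by omega, by simpa using hbj1⟩⟩
      intro k hk1 hk2
      have hk : k = j + 2 := by omega
      subst hk
      have hbjm1 : best d (j - 1) = st.1 := hflat _ hlnj1 (by omega)
      show best d (j + 1 + 1) = st.1 + 1
      rw [best_succ_eq, e1, e2', hbj1, hbjm1]
      split_ifs with h1 h2 h2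
      · exact absurd h2.2 hnP2
      · omega
      · exact absurd ⟨by omega, hP3⟩ h1
      · exact absurd ⟨by omega, hP3⟩ h1
    · -- take nothing: best stays flat through j+2
      rw [if_neg (by
        intro hcon
        simp only [Bool.and_eq_true, decide_eq_true_eq, beq_iff_eq] at hcon
        exact g2 ⟨hcon.1, hcon.2.symm⟩)]
      refine ⟨ln, hln, by omega, ?_, hlast⟩
      intro k hk1 hk2
      rcases Nat.lt_or_ge k (j + 2) with h | h
      · exact hflat _ hk1 (by omega)
      have hk : k = j + 2 := by omega
      subst hk
      -- the pair branch cannot improve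
      have hpair_le : (d.getD (j + 1) 0 + d.getD j 0) % 3 = 0 → 1 + best d j ≤ st.1 := by
        intro hP2
        have hSeq : S d (j + 2) = S d j := (S_pair d j).mpr hP2
        have hlngt : ¬ (ln : Int) ≤ ((j + 2 : Nat) : Int) - 2 := fun hc => g1 ⟨hc, hSeq⟩
        have hlnj : j < ln := by push_cast at hlngt; omega
        rcases hlast with ⟨h0, -⟩ | ⟨h2, hbl⟩
        · omega
        · have : best d j = st.1 - 1 := by
            have e' : ln - 1 = j := by omega
            rwa [e'] at hbl
          omega
      -- the triple branch cannot improve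
      have htriple_le : 1 ≤ j → (d.getD (j + 1) 0 + d.getD j 0 + d.getD (j - 1) 0) % 3 = 0 →
          1 + best d (j - 1) ≤ st.1 := by
        intro hj1 hP3
        have hSeq : S d (j + 2) = S d (j - 1) := by
          have ht := (S_triple d (j - 1)).mpr (by
            have ea : j - 1 + 2 = j + 1 := by omega
            have eb : j - 1 + 1 = j := by omega
            rw [ea, eb]; exact hP3)
          have e' : j - 1 + 3 = j + 2 := by omega
          rwa [e'] at ht
        have hg3 : PySem.List.pyGetD pref ((((j + 2 : Nat)) : Int) - 3) 0 = S d (j - 1) := by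
          have e3 : (((j + 2 : Nat)) : Int) - 3 = ((j - 1 : Nat) : Int) := by push_cast; omega
          rw [e3]; exact pref_getD d n _ (by omega)
        have hlngt : ¬ (ln : Int) ≤ ((j + 2 : Nat) : Int) - 3 := by
          intro hc
          exact g2 ⟨hc, by rw [hg3, hSeq]⟩
        have hlnj : j - 1 < ln := by push_cast at hlngt; omega
        rcases hlast with ⟨h0, -⟩ | ⟨h2, hbl⟩
        · omega
        · have : best d (j - 1) ≤ st.1 - 1 := by
            rw [← hbl]; exact best_mono (by omega)
          omega
      show best d (j + 1 + 1) = st.1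
      rw [best_succ_eq, e1, e2', hbj1]
      split_ifs with h1 h2 h2
      · have ha := hpair_le h2.2
        have hb := htriple_le (by omega) h1.2
        omega
      · have hb := htriple_le (by omega) h1.2
        omega
      · have ha := hpair_le h2.2
        omega
      · rfl

lemma greedy_inv (d : List Int) (n m : Nat) (hm : m + 1 ≤ n) :
    INV d (m + 1) ((List.range' 2 m).foldl (greedyStepB ((List.range (n + 1)).map (S d))) (0, 0)) := by
  induction m with
  | zero =>
    refine ⟨0, rfl, by omega, ?_, Or.inl ⟨rfl, rfl⟩⟩
    intro k hk1 hk2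
    interval_cases k <;> simp [best]
  | succ m ih =>
    have : List.range' 2 (m + 1) = List.range' 2 m ++ [2 + m] := by
      rw [List.range'_concat]
      simp [Nat.mul_one]
    rw [this, List.foldl_append]
    simp only [List.foldl_cons, List.foldl_nil]
    have e : 2 + m = m + 2 := by omega
    rw [e]
    exact greedy_step d n m (by omega) _ (ih (by omega))

-- ===== VERDICT (by name: the statement is the Claim_ definition above) =====
theorem solve_spec : Claim_equal_solve := by
  unfold Claim_equal_solve Spec_solve
  intro s2 _ hpre
  by_cases hlen : s2.toList.length < 2
  · -- strings of length 0 or 1: both programs return 0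
    unfold solve solve_alt
    dsimp only
    rw [if_pos hlen]
    rcases h : s2.toList with _ | ⟨c, tl⟩
    · simp [h]
      decide
    · rcases h2 : tl with _ | ⟨c2, tl2⟩
      · simp [h, h2, solveStepA]
        decide
      · rw [h, h2] at hlen; simp at hlen
  · have hd : s2.toList.all Char.isDigit = true := by
      rcases hpre with h | h
      · omega
      · exact h
    unfold solve solve_alt
    dsimp only
    rw [if_neg hlen]
    set cs := s2.toList with hcs
    set d := cs.map dval with hdd
    have hdB : cs.map (fun ch => (PySem.Int.ofChars? [ch]).getD 0) = d := by
      rw [hdd]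
      apply List.map_congr_left
      intro c hc
      rw [ofChars_single c ((List.all_eq_true.mp hd) _ hc)]
      rfl
    have hlend : d.length = cs.length := by simp [hdd]
    -- A's side equals best d n
    have hA : PySem.List.pyGetD
        ((List.range cs.length).foldl (solveStepA cs) (List.replicate (cs.length + 1) 0)) (-1) 0
        = best d cs.length := by
      rw [A_inv _ hd _ (le_refl _)]
      rw [PySem.List.pyGetD_neg_ofNat _ 1 0 (by omega) (by rw [dpList_length]; omega)]
      rw [dpList_getElem (by rw [dpList_length]; omega) (by rw [dpList_length]; omega)]
      simp [dpList_length]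
      rw [← hdd]
    -- B's prefix list is the table of S values
    have hfold : cs.foldl prefStepB (0, [0]) = (S d d.length, (List.range (d.length + 1)).map (S d)) := by
      have hst : ((0 : Int), ([0] : List Int)) = (S d 0, (List.range 1).map (S d)) := by
        simp [S]
      rw [hst]
      exact pref_fold_aux d cs 0 (by simpa using hdB) (by simp [hlend])
    rw [hfold, hA]
    dsimp only
    simp only [List.length_map, List.length_range]
    have hn2 : 2 ≤ d.length := by rw [hlend]; omega
    have e : d.length + 1 - 1 - 1 = d.length - 1 := by omega
    rw [e, ← hlend]
    obtain ⟨ln, hln, hle, hflat, -⟩ := greedy_inv d d.length (d.length - 1) (by omega)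
    have en : d.length - 1 + 1 = d.length := by omega
    rw [en] at hle hflat
    exact hflat d.length hle (le_refl _)
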